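-- pv_equiv track=rewrite | github.com/manas-17045/LeetcodeSolutions | Leetcode 2001-2100/2060/2060_1.py | possiblyEquals
-- ===== SOURCE A (Python) =====
-- def possiblyEquals(s1: str, s2: str) -> bool:
--     """
--     Checks if two encoded strings can possibly represent the same original string.
--
--     The encoded strings can contain lowercase English letters and digits.
--     Digits represent the number of characters they replace.
--
--     Args:
--         s1 (str): The first encoded string.
--         s2 (str): The second encoded string.
--     Returns:
--         bool: True if the two encoded strings can represent the same original string, False otherwise.
--     """
--     lenOne = len(s1)
--     lenTwo = len(s2)
--     memo = {}
--
--     def solve(i, j, diff):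
--         if i == lenOne and j == lenTwo:
--             return diff == 0
--
--         state = (i, j, diff)
--         if state in memo:
--             return memo[state]
--
--         # Option 1: s1 parses a number.
--         # This can be chosen regardless of the current diff value.
--         if i < lenOne and s1[i].isdigit():
--             num = 0
--             k = i
--             while k < lenOne and s1[k].isdigit():
--                 num = num * 10 + int(s1[k])
--                 k += 1
--                 if solve(k, j, diff + num):
--                     memo[state] = True
--                     return True
--
--         # Option 2: s2 parses a number.
--         # This can also be chosen regardless of the diff.
--         if j < lenTwo and s2[j].isdigit():
--             num = 0
--             k = j
--             while k < lenTwo and s2[k].isdigit():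
--                 num = num * 10 + int(s2[k])
--                 k += 1
--                 if solve(i, k, diff - num):
--                     memo[state] = True
--                     return True
--
--         # Option 3: Match characters based on the length difference.
--         if diff > 0:
--             # s1 is ahead, so s2 must provide a literal character to catch up.
--             if j < lenTwo and s2[j].isalpha():
--                 if solve(i, j + 1, diff - 1):
--                     memo[state] = True
--                     return True
--         elif diff < 0:
--             # s2 is ahead, so s1 must provide a literal character.
--             if i < lenOne and s1[i].isalpha():
--                 if solve(i + 1, j, diff + 1):
--                     memo[state] = True
--                     return True
--         else:  # diff is zero, lengths are balanced.
--             # Both must be letters and must match.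
--             if i < lenOne and j < lenTwo and s1[i].isalpha() and s2[j].isalpha() and s1[i] == s2[j]:
--                 if solve(i + 1, j + 1, 0):
--                     memo[state] = True
--                     return True
--
--         memo[state] = False
--         return False
--
--     return solve(0, 0, 0)
-- ===== SOURCE B (Python) =====
-- def possiblyEquals(s1: str, s2: str) -> bool:
--     """Forward layered reachability over states (i, j, diff) instead of
--     top-down recursion with memoization."""
--     n1, n2 = len(s1), len(s2)
--
--     def successors(i, j, d):
--         out = []
--         k, num = i, 0
--         while k < n1 and s1[k].isdigit():
--             num = num * 10 + int(s1[k])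
--             k += 1
--             out.append((k, j, d + num))
--         k, num = j, 0
--         while k < n2 and s2[k].isdigit():
--             num = num * 10 + int(s2[k])
--             k += 1
--             out.append((i, k, d - num))
--         if d > 0:
--             if j < n2 and s2[j].isalpha():
--                 out.append((i, j + 1, d - 1))
--         elif d < 0:
--             if i < n1 and s1[i].isalpha():
--                 out.append((i + 1, j, d + 1))
--         else:
--             if i < n1 and j < n2 and s1[i].isalpha() and s2[j].isalpha() and s1[i] == s2[j]:
--                 out.append((i + 1, j + 1, 0))
--         return out
--
--     reached = {(0, 0, 0)}
--     # every edge strictly increases i + j, so one pass over the layers suffices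
--     for t in range(n1 + n2):
--         for state in [s for s in reached if s[0] + s[1] == t]:
--             for nxt in successors(*state):
--                 reached.add(nxt)
--     return (n1, n2, 0) in reached
-- ===== Notes on version B (the rewrite author's own statement) =====
-- stated objective: alternative
-- what changed: Replaces the top-down recursion with memoization by an iterative forward reachability pass: states (i, j, diff) are expanded layer by layer in increasing i+j (every transition strictly increases i+j), and the answer is whether (len(s1), len(s2), 0) is reached.
import Mathlib
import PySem

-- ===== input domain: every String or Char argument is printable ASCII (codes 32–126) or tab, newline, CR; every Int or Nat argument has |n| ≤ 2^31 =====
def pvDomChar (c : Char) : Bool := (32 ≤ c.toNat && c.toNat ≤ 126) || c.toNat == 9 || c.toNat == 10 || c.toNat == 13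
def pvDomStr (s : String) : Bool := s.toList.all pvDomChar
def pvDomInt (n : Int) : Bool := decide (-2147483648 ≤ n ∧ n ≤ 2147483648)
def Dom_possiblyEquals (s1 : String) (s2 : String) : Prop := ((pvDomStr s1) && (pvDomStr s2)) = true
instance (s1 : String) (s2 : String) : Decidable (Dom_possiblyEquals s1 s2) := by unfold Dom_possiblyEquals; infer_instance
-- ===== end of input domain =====

-- B replaces A's top-down memoized recursion over states (i, j, diff) by an iterative
-- forward reachability pass, expanding states layer by layer in increasing i + j; same
-- results, a genuinely different traversal (objective: alternative).

-- ===== PORT A =====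

-- int(c) for a digit character (used only under an isdigit guard, where it is exact)
def pvDigitVal (c : Char) : Int := (c.toNat : Int) - 48

abbrev PvMemo := PySem.Dict (Nat × Nat × Int) Bool

-- the nested function `solve` with its memo dictionary threaded through;
-- pvLoop1/pvLoop2 are the two inner `while` loops (s1[k] under the guard k < len
-- is List.getD, exact there).  Early `return True` = short-circuiting on r.1.
-- `fuel` is only a structural-termination guard: the top-level call passes more
-- fuel than the recursion can ever consume, so the 0-branches are never reached.
mutual
def pvSolve (l1 l2 : List Char) : Nat → Nat → Nat → Int → PvMemo → Bool × PvMemo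
  | 0, _, _, _, m => (false, m)
  | fuel + 1, i, j, d, m =>
    if i = l1.length ∧ j = l2.length then (d == 0, m)
    else
      match m.get? (i, j, d) with
      | some v => (v, m)
      | none =>
        let r1 :=
          if i < l1.length ∧ PySem.Chars.isdigit (l1.getD i ' ') then
            pvLoop1 l1 l2 fuel i j d i 0 m
          else (false, m)
        if r1.1 then (true, r1.2.insert (i, j, d) true)
        else
          let r2 :=
            if j < l2.length ∧ PySem.Chars.isdigit (l2.getD j ' ') then
              pvLoop2 l1 l2 fuel i j d j 0 r1.2
            else (false, r1.2)
          if r2.1 then (true, r2.2.insert (i, j, d) true)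
          else
            let r3 :=
              if 0 < d then
                if j < l2.length ∧ PySem.Chars.isalpha (l2.getD j ' ') then
                  pvSolve l1 l2 fuel i (j + 1) (d - 1) r2.2
                else (false, r2.2)
              else if d < 0 then
                if i < l1.length ∧ PySem.Chars.isalpha (l1.getD i ' ') then
                  pvSolve l1 l2 fuel (i + 1) j (d + 1) r2.2
                else (false, r2.2)
              else
                if i < l1.length ∧ j < l2.length ∧ PySem.Chars.isalpha (l1.getD i ' ')
                    ∧ PySem.Chars.isalpha (l2.getD j ' ') ∧ l1.getD i ' ' = l2.getD j ' ' then
                  pvSolve l1 l2 fuel (i + 1) (j + 1) 0 r2.2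
                else (false, r2.2)
            if r3.1 then (true, r3.2.insert (i, j, d) true)
            else (false, r3.2.insert (i, j, d) false)

def pvLoop1 (l1 l2 : List Char) : Nat → Nat → Nat → Int → Nat → Int → PvMemo → Bool × PvMemo
  | 0, _, _, _, _, _, m => (false, m)
  | fuel + 1, i, j, d, k, num, m =>
    if k < l1.length ∧ PySem.Chars.isdigit (l1.getD k ' ') then
      let num' := num * 10 + pvDigitVal (l1.getD k ' ')
      let r := pvSolve l1 l2 fuel (k + 1) j (d + num') m
      if r.1 then (true, r.2) else pvLoop1 l1 l2 fuel i j d (k + 1) num' r.2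
    else (false, m)

def pvLoop2 (l1 l2 : List Char) : Nat → Nat → Nat → Int → Nat → Int → PvMemo → Bool × PvMemo
  | 0, _, _, _, _, _, m => (false, m)
  | fuel + 1, i, j, d, k, num, m =>
    if k < l2.length ∧ PySem.Chars.isdigit (l2.getD k ' ') then
      let num' := num * 10 + pvDigitVal (l2.getD k ' ')
      let r := pvSolve l1 l2 fuel i (k + 1) (d - num') m
      if r.1 then (true, r.2) else pvLoop2 l1 l2 fuel i j d (k + 1) num' r.2
    else (false, m)
end

def possiblyEquals (s1 : String) (s2 : String) : Bool :=
  (pvSolve s1.toList s2.toList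
    ((s1.toList.length + s2.toList.length + 3) * (s1.toList.length + s2.toList.length + 1))
    0 0 0 PySem.Dict.empty).1

-- ===== PORT B =====

-- the first `while` loop of `successors`: digit-run successors from s1
def pvSuccs1 (l1 : List Char) (j : Nat) (d : Int) (k : Nat) (num : Int) : List (Nat × Nat × Int) :=
  if k < l1.length ∧ PySem.Chars.isdigit (l1.getD k ' ') then
    let num' := num * 10 + pvDigitVal (l1.getD k ' ')
    (k + 1, j, d + num') :: pvSuccs1 l1 j d (k + 1) num'
  else []
termination_by l1.length - k
decreasing_by omega

-- the second `while` loop of `successors`: digit-run successors from s2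
def pvSuccs2 (l2 : List Char) (i : Nat) (d : Int) (k : Nat) (num : Int) : List (Nat × Nat × Int) :=
  if k < l2.length ∧ PySem.Chars.isdigit (l2.getD k ' ') then
    let num' := num * 10 + pvDigitVal (l2.getD k ' ')
    (i, k + 1, d - num') :: pvSuccs2 l2 i d (k + 1) num'
  else []
termination_by l2.length - k
decreasing_by omega

-- `successors(i, j, d)`
def pvSuccs (l1 l2 : List Char) (s : Nat × Nat × Int) : List (Nat × Nat × Int) :=
  match s with
  | (i, j, d) =>
    pvSuccs1 l1 j d i 0 ++ pvSuccs2 l2 i d j 0 ++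
      (if 0 < d then
        if j < l2.length ∧ PySem.Chars.isalpha (l2.getD j ' ') then [(i, j + 1, d - 1)] else []
      else if d < 0 then
        if i < l1.length ∧ PySem.Chars.isalpha (l1.getD i ' ') then [(i + 1, j, d + 1)] else []
      else
        if i < l1.length ∧ j < l2.length ∧ PySem.Chars.isalpha (l1.getD i ' ')
            ∧ PySem.Chars.isalpha (l2.getD j ' ') ∧ l1.getD i ' ' = l2.getD j ' ' then
          [(i + 1, j + 1, (0 : Int))]
        else [])

-- the layered loop: `reached` is a set of states; layer t expands the states with
-- i + j = t (the final membership answer does not depend on the iteration order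
-- over the set, which is what the proof below establishes)
def possiblyEquals_alt (s1 : String) (s2 : String) : Bool :=
  let l1 := s1.toList
  let l2 := s2.toList
  let R := (List.range (l1.length + l2.length)).foldl
    (fun R t =>
      (R.filter (fun s => s.1 + s.2.1 == t)).foldl
        (fun R' s => (pvSuccs l1 l2 s).foldl PySem.Set.add R') R)
    (PySem.Set.ofList [(0, 0, 0)])
  R.contains (l1.length, l2.length, 0)

-- ===== PRECONDITION & SPEC =====
def Spec_possiblyEquals (s1 : String) (s2 : String) (out : Bool) : Prop := out = possiblyEquals_alt s1 s2
instance (s1 : String) (s2 : String) (out : Bool) : Decidable (Spec_possiblyEquals s1 s2 out) := by unfold Spec_possiblyEquals; infer_instance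

-- ===== CLAIM (what is proved, stated in full; the proofs are below) =====
def Claim_equal_possiblyEquals : Prop := ∀ (s1 : String) (s2 : String), Dom_possiblyEquals s1 s2 → Spec_possiblyEquals s1 s2 (possiblyEquals s1 s2)

-- ===== LEMMAS AND PROOFS =====

-- the value of the digit run s[k:b] accumulated on top of num
def pvVal (l : List Char) (k b : Nat) (num : Int) : Int :=
  if k < b then pvVal l (k + 1) b (num * 10 + pvDigitVal (l.getD k ' ')) else num
termination_by b - k
decreasing_by omega

-- A's recursion with the memo dictionary erased (the reference function)
mutual
def pvF (l1 l2 : List Char) (i j : Nat) (d : Int) : Bool :=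
  if i = l1.length ∧ j = l2.length then d == 0
  else
    (if i < l1.length ∧ PySem.Chars.isdigit (l1.getD i ' ') then pvL1 l1 l2 j d i 0 else false)
    || (if j < l2.length ∧ PySem.Chars.isdigit (l2.getD j ' ') then pvL2 l1 l2 i d j 0 else false)
    || (if 0 < d then
          if j < l2.length ∧ PySem.Chars.isalpha (l2.getD j ' ') then
            pvF l1 l2 i (j + 1) (d - 1)
          else false
        else if d < 0 then
          if i < l1.length ∧ PySem.Chars.isalpha (l1.getD i ' ') then
            pvF l1 l2 (i + 1) j (d + 1)
          else false
        else
          if i < l1.length ∧ j < l2.length ∧ PySem.Chars.isalpha (l1.getD i ' ')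
              ∧ PySem.Chars.isalpha (l2.getD j ' ') ∧ l1.getD i ' ' = l2.getD j ' ' then
            pvF l1 l2 (i + 1) (j + 1) 0
          else false)
termination_by ((l1.length - i) + (l2.length - j), 1)
decreasing_by all_goals omega

def pvL1 (l1 l2 : List Char) (j : Nat) (d : Int) (k : Nat) (num : Int) : Bool :=
  if k < l1.length ∧ PySem.Chars.isdigit (l1.getD k ' ') then
    let num' := num * 10 + pvDigitVal (l1.getD k ' ')
    pvF l1 l2 (k + 1) j (d + num') || pvL1 l1 l2 j d (k + 1) num'
  else false
termination_by ((l1.length - k) + (l2.length - j), 0)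
decreasing_by all_goals omega

def pvL2 (l1 l2 : List Char) (i : Nat) (d : Int) (k : Nat) (num : Int) : Bool :=
  if k < l2.length ∧ PySem.Chars.isdigit (l2.getD k ' ') then
    let num' := num * 10 + pvDigitVal (l2.getD k ' ')
    pvF l1 l2 i (k + 1) (d - num') || pvL2 l1 l2 i d (k + 1) num'
  else false
termination_by ((l1.length - i) + (l2.length - k), 0)
decreasing_by all_goals omega
end

-- one transition of the state graph shared by both programs
def pvStep (l1 l2 : List Char) (s s' : Nat × Nat × Int) : Prop :=
  (∃ b, s.1 < b ∧ b ≤ l1.length ∧ (∀ t, s.1 ≤ t → t < b → PySem.Chars.isdigit (l1.getD t ' '))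
     ∧ s' = (b, s.2.1, s.2.2 + pvVal l1 s.1 b 0))
  ∨ (∃ b, s.2.1 < b ∧ b ≤ l2.length ∧ (∀ t, s.2.1 ≤ t → t < b → PySem.Chars.isdigit (l2.getD t ' '))
     ∧ s' = (s.1, b, s.2.2 - pvVal l2 s.2.1 b 0))
  ∨ (0 < s.2.2 ∧ s.2.1 < l2.length ∧ PySem.Chars.isalpha (l2.getD s.2.1 ' ')
     ∧ s' = (s.1, s.2.1 + 1, s.2.2 - 1))
  ∨ (s.2.2 < 0 ∧ s.1 < l1.length ∧ PySem.Chars.isalpha (l1.getD s.1 ' ')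
     ∧ s' = (s.1 + 1, s.2.1, s.2.2 + 1))
  ∨ (s.2.2 = 0 ∧ s.1 < l1.length ∧ s.2.1 < l2.length ∧ PySem.Chars.isalpha (l1.getD s.1 ' ')
     ∧ PySem.Chars.isalpha (l2.getD s.2.1 ' ') ∧ l1.getD s.1 ' ' = l2.getD s.2.1 ' '
     ∧ s' = (s.1 + 1, s.2.1 + 1, (0 : Int)))

-- reachability from (0,0,0) by steps whose sources have i + j < t
inductive pvRB (l1 l2 : List Char) (t : Nat) : Nat × Nat × Int → Prop where
  | base : pvRB l1 l2 t (0, 0, 0)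
  | step {s s'} : pvRB l1 l2 t s → s.1 + s.2.1 < t → pvStep l1 l2 s s' → pvRB l1 l2 t s'

def pvGood (l1 l2 : List Char) (m : PvMemo) : Prop :=
  ∀ i j d v, m.get? (i, j, d) = some v → v = pvF l1 l2 i j d

theorem pvGood_empty (l1 l2 : List Char) : pvGood l1 l2 PySem.Dict.empty := by
  intro i j d v h
  simp [PySem.Dict.get?_empty] at h

theorem pvGood_insert (l1 l2 : List Char) (m : PvMemo) (hm : pvGood l1 l2 m)
    (i j : Nat) (d : Int) (v : Bool) (hv : v = pvF l1 l2 i j d) :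
    pvGood l1 l2 (m.insert (i, j, d) v) := by
  intro i' j' d' w hw
  rw [PySem.Dict.get?_insert] at hw
  split_ifs at hw with he
  · obtain ⟨rfl, rfl, rfl⟩ : i' = i ∧ j' = j ∧ d' = d := by simpa [Prod.ext_iff] using he
    injection hw with hw
    rw [← hw, hv]
  · exact hm i' j' d' w hw

theorem pvSolve_eq_aux (l1 l2 : List Char) :
    ∀ fuel : Nat,
    (∀ (N i j : Nat) (d : Int) (m : PvMemo), (l1.length - i) + (l2.length - j) < N →
      (l1.length + l2.length + 3) * N ≤ fuel → pvGood l1 l2 m →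
      (pvSolve l1 l2 fuel i j d m).1 = pvF l1 l2 i j d
        ∧ pvGood l1 l2 (pvSolve l1 l2 fuel i j d m).2)
    ∧ (∀ (N i j : Nat) (d : Int) (k : Nat) (num : Int) (m : PvMemo),
        (l1.length - i) + (l2.length - k) < N →
        (l1.length + l2.length + 3) * (N - 1) + (l2.length - k) + 2 ≤ fuel → pvGood l1 l2 m →
      (pvLoop2 l1 l2 fuel i j d k num m).1 = pvL2 l1 l2 i d k num
        ∧ pvGood l1 l2 (pvLoop2 l1 l2 fuel i j d k num m).2)
    ∧ (∀ (N i j : Nat) (d : Int) (k : Nat) (num : Int) (m : PvMemo),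
        (l1.length - k) + (l2.length - j) < N →
        (l1.length + l2.length + 3) * (N - 1) + (l1.length - k) + 2 ≤ fuel → pvGood l1 l2 m →
      (pvLoop1 l1 l2 fuel i j d k num m).1 = pvL1 l1 l2 j d k num
        ∧ pvGood l1 l2 (pvLoop1 l1 l2 fuel i j d k num m).2) := by
  intro fuel
  induction fuel using Nat.strong_induction_on with
  | _ fuel IH =>
  refine ⟨?_, ?_, ?_⟩
  · -- pvSolve
    intro N i j d m hb hf hg
    have hN1 : 1 ≤ N := by omega
    have hmul : (l1.length + l2.length + 3) * N
        = (l1.length + l2.length + 3) * (N - 1) + (l1.length + l2.length + 3) := by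
      conv_lhs => rw [← Nat.succ_pred_eq_of_pos hN1]
      rw [Nat.mul_succ]
      rfl
    obtain ⟨f, rfl⟩ : ∃ f, fuel = f + 1 := ⟨fuel - 1, by omega⟩
    by_cases hterm : i = l1.length ∧ j = l2.length
    · rw [pvF]
      simp only [pvSolve]
      rw [if_pos hterm, if_pos hterm]
      exact ⟨rfl, hg⟩
    · simp only [pvSolve]
      rw [if_neg hterm]
      have hFeq : pvF l1 l2 i j d =
          ((if i < l1.length ∧ PySem.Chars.isdigit (l1.getD i ' ') = true then
              pvL1 l1 l2 j d i 0 else false)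
            || (if j < l2.length ∧ PySem.Chars.isdigit (l2.getD j ' ') = true then
              pvL2 l1 l2 i d j 0 else false)
            || (if 0 < d then
                  if j < l2.length ∧ PySem.Chars.isalpha (l2.getD j ' ') = true then
                    pvF l1 l2 i (j + 1) (d - 1)
                  else false
                else if d < 0 then
                  if i < l1.length ∧ PySem.Chars.isalpha (l1.getD i ' ') = true then
                    pvF l1 l2 (i + 1) j (d + 1)
                  else false
                else
                  if i < l1.length ∧ j < l2.length ∧ PySem.Chars.isalpha (l1.getD i ' ')
                      ∧ PySem.Chars.isalpha (l2.getD j ' ') ∧ l1.getD i ' ' = l2.getD j ' ' then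
                    pvF l1 l2 (i + 1) (j + 1) 0
                  else false)) := by
        rw [pvF, if_neg hterm]
      cases hmm : PySem.Dict.get? m (i, j, d) with
      | some v =>
        exact ⟨hg i j d v hmm, hg⟩
      | none =>
        dsimp only
        -- the first option (digit run in s1)
        have h1 : (if i < l1.length ∧ PySem.Chars.isdigit (l1.getD i ' ') = true then
              pvLoop1 l1 l2 f i j d i 0 m else (false, m)).1
            = (if i < l1.length ∧ PySem.Chars.isdigit (l1.getD i ' ') = true then
              pvL1 l1 l2 j d i 0 else false)
            ∧ pvGood l1 l2 (if i < l1.length ∧ PySem.Chars.isdigit (l1.getD i ' ') = true then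
              pvLoop1 l1 l2 f i j d i 0 m else (false, m)).2 := by
          by_cases hg1 : i < l1.length ∧ PySem.Chars.isdigit (l1.getD i ' ') = true
          · rw [if_pos hg1, if_pos hg1]
            exact (IH f (by omega)).2.2 N i j d i 0 m hb (by omega) hg
          · rw [if_neg hg1, if_neg hg1]
            exact ⟨rfl, hg⟩
        obtain ⟨h11, h12⟩ := h1
        rw [h11]
        by_cases hv1 : (if i < l1.length ∧ PySem.Chars.isdigit (l1.getD i ' ') = true then
            pvL1 l1 l2 j d i 0 else false) = true
        · rw [if_pos hv1]
          have hFt : pvF l1 l2 i j d = true := by rw [hFeq, hv1]; rfl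
          exact ⟨hFt.symm, pvGood_insert l1 l2 _ h12 i j d true hFt.symm⟩
        · rw [if_neg hv1]
          have hv1' := Bool.eq_false_iff.mpr hv1
          generalize hm1 : (if i < l1.length ∧ PySem.Chars.isdigit (l1.getD i ' ') = true then
              pvLoop1 l1 l2 f i j d i 0 m else (false, m)).2 = m1
          rw [hm1] at h12
          -- the second option (digit run in s2)
          have h2 : (if j < l2.length ∧ PySem.Chars.isdigit (l2.getD j ' ') = true then
                pvLoop2 l1 l2 f i j d j 0 m1 else (false, m1)).1
              = (if j < l2.length ∧ PySem.Chars.isdigit (l2.getD j ' ') = true then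
                pvL2 l1 l2 i d j 0 else false)
              ∧ pvGood l1 l2 (if j < l2.length ∧ PySem.Chars.isdigit (l2.getD j ' ') = true then
                pvLoop2 l1 l2 f i j d j 0 m1 else (false, m1)).2 := by
            by_cases hg2 : j < l2.length ∧ PySem.Chars.isdigit (l2.getD j ' ') = true
            · rw [if_pos hg2, if_pos hg2]
              exact (IH f (by omega)).2.1 N i j d j 0 m1 hb (by omega) h12
            · rw [if_neg hg2, if_neg hg2]
              exact ⟨rfl, h12⟩
          obtain ⟨h21, h22⟩ := h2
          rw [h21]
          by_cases hv2 : (if j < l2.length ∧ PySem.Chars.isdigit (l2.getD j ' ') = true then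
              pvL2 l1 l2 i d j 0 else false) = true
          · rw [if_pos hv2]
            have hFt : pvF l1 l2 i j d = true := by rw [hFeq, hv1', hv2]; rfl
            exact ⟨hFt.symm, pvGood_insert l1 l2 _ h22 i j d true hFt.symm⟩
          · rw [if_neg hv2]
            have hv2' := Bool.eq_false_iff.mpr hv2
            generalize hm2 : (if j < l2.length ∧ PySem.Chars.isdigit (l2.getD j ' ') = true then
                pvLoop2 l1 l2 f i j d j 0 m1 else (false, m1)).2 = m2
            rw [hm2] at h22
            -- the third option (matching on the sign of diff)
            have h3 : (if 0 < d then
                  if j < l2.length ∧ PySem.Chars.isalpha (l2.getD j ' ') = true then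
                    pvSolve l1 l2 f i (j + 1) (d - 1) m2
                  else (false, m2)
                else if d < 0 then
                  if i < l1.length ∧ PySem.Chars.isalpha (l1.getD i ' ') = true then
                    pvSolve l1 l2 f (i + 1) j (d + 1) m2
                  else (false, m2)
                else
                  if i < l1.length ∧ j < l2.length ∧ PySem.Chars.isalpha (l1.getD i ' ')
                      ∧ PySem.Chars.isalpha (l2.getD j ' ') ∧ l1.getD i ' ' = l2.getD j ' ' then
                    pvSolve l1 l2 f (i + 1) (j + 1) 0 m2
                  else (false, m2)).1
                = (if 0 < d then
                    if j < l2.length ∧ PySem.Chars.isalpha (l2.getD j ' ') = true then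
                      pvF l1 l2 i (j + 1) (d - 1)
                    else false
                  else if d < 0 then
                    if i < l1.length ∧ PySem.Chars.isalpha (l1.getD i ' ') = true then
                      pvF l1 l2 (i + 1) j (d + 1)
                    else false
                  else
                    if i < l1.length ∧ j < l2.length ∧ PySem.Chars.isalpha (l1.getD i ' ')
                        ∧ PySem.Chars.isalpha (l2.getD j ' ') ∧ l1.getD i ' ' = l2.getD j ' ' then
                      pvF l1 l2 (i + 1) (j + 1) 0
                    else false)
                ∧ pvGood l1 l2 (if 0 < d then
                  if j < l2.length ∧ PySem.Chars.isalpha (l2.getD j ' ') = true then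
                    pvSolve l1 l2 f i (j + 1) (d - 1) m2
                  else (false, m2)
                else if d < 0 then
                  if i < l1.length ∧ PySem.Chars.isalpha (l1.getD i ' ') = true then
                    pvSolve l1 l2 f (i + 1) j (d + 1) m2
                  else (false, m2)
                else
                  if i < l1.length ∧ j < l2.length ∧ PySem.Chars.isalpha (l1.getD i ' ')
                      ∧ PySem.Chars.isalpha (l2.getD j ' ') ∧ l1.getD i ' ' = l2.getD j ' ' then
                    pvSolve l1 l2 f (i + 1) (j + 1) 0 m2
                  else (false, m2)).2 := by
              by_cases h0 : 0 < d
              · rw [if_pos h0, if_pos h0]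
                by_cases hga : j < l2.length ∧ PySem.Chars.isalpha (l2.getD j ' ') = true
                · rw [if_pos hga, if_pos hga]
                  exact (IH f (by omega)).1 (N - 1) i (j + 1) (d - 1) m2 (by omega)
                    (by omega) h22
                · rw [if_neg hga, if_neg hga]
                  exact ⟨rfl, h22⟩
              · rw [if_neg h0, if_neg h0]
                by_cases hneg : d < 0
                · rw [if_pos hneg, if_pos hneg]
                  by_cases hga : i < l1.length ∧ PySem.Chars.isalpha (l1.getD i ' ') = true
                  · rw [if_pos hga, if_pos hga]
                    exact (IH f (by omega)).1 (N - 1) (i + 1) j (d + 1) m2 (by omega)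
                      (by omega) h22
                  · rw [if_neg hga, if_neg hga]
                    exact ⟨rfl, h22⟩
                · rw [if_neg hneg, if_neg hneg]
                  by_cases hga : i < l1.length ∧ j < l2.length ∧ PySem.Chars.isalpha (l1.getD i ' ')
                      ∧ PySem.Chars.isalpha (l2.getD j ' ') ∧ l1.getD i ' ' = l2.getD j ' '
                  · rw [if_pos hga, if_pos hga]
                    exact (IH f (by omega)).1 (N - 1) (i + 1) (j + 1) 0 m2 (by omega)
                      (by omega) h22
                  · rw [if_neg hga, if_neg hga]
                    exact ⟨rfl, h22⟩
            obtain ⟨h31, h32⟩ := h3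
            rw [h31]
            by_cases hv3 : (if 0 < d then
                if j < l2.length ∧ PySem.Chars.isalpha (l2.getD j ' ') = true then
                  pvF l1 l2 i (j + 1) (d - 1)
                else false
              else if d < 0 then
                if i < l1.length ∧ PySem.Chars.isalpha (l1.getD i ' ') = true then
                  pvF l1 l2 (i + 1) j (d + 1)
                else false
              else
                if i < l1.length ∧ j < l2.length ∧ PySem.Chars.isalpha (l1.getD i ' ')
                    ∧ PySem.Chars.isalpha (l2.getD j ' ') ∧ l1.getD i ' ' = l2.getD j ' ' then
                  pvF l1 l2 (i + 1) (j + 1) 0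
                else false) = true
            · rw [if_pos hv3]
              have hFt : pvF l1 l2 i j d = true := by rw [hFeq, hv1', hv2', hv3]; rfl
              exact ⟨hFt.symm, pvGood_insert l1 l2 _ h32 i j d true hFt.symm⟩
            · rw [if_neg hv3]
              have hv3' := Bool.eq_false_iff.mpr hv3
              have hFf : pvF l1 l2 i j d = false := by rw [hFeq, hv1', hv2', hv3']; rfl
              exact ⟨hFf.symm, pvGood_insert l1 l2 _ h32 i j d false hFf.symm⟩
  · -- pvLoop2
    intro N i j d k num m hb hf hg
    by_cases hgd : k < l2.length ∧ PySem.Chars.isdigit (l2.getD k ' ') = true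
    · obtain ⟨g, rfl⟩ : ∃ g, fuel = g + 1 := ⟨fuel - 1, by omega⟩
      rw [pvL2]
      simp only [pvLoop2]
      rw [if_pos hgd, if_pos hgd]
      obtain ⟨hs1, hs2⟩ := (IH g (by omega)).1 (N - 1)
        i (k + 1) (d - (num * 10 + pvDigitVal (l2.getD k ' '))) m (by omega) (by omega) hg
      simp only [hs1]
      by_cases hr : pvF l1 l2 i (k + 1) (d - (num * 10 + pvDigitVal (l2.getD k ' '))) = true
      · rw [if_pos hr]
        exact ⟨by rw [hr]; rfl, hs2⟩
      · rw [if_neg hr]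
        have hr' := Bool.eq_false_iff.mpr hr
        simp only [hr', Bool.false_or]
        exact (IH g (by omega)).2.1 N i j d (k + 1)
          (num * 10 + pvDigitVal (l2.getD k ' ')) _ (by omega) (by omega) hs2
    · cases fuel with
      | zero =>
        rw [pvL2, if_neg hgd]
        simp only [pvLoop2]
        exact ⟨trivial, hg⟩
      | succ g =>
        rw [pvL2, if_neg hgd]
        simp only [pvLoop2]
        rw [if_neg hgd]
        exact ⟨rfl, hg⟩
  · -- pvLoop1
    intro N i j d k num m hb hf hg
    by_cases hgd : k < l1.length ∧ PySem.Chars.isdigit (l1.getD k ' ') = true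
    · obtain ⟨g, rfl⟩ : ∃ g, fuel = g + 1 := ⟨fuel - 1, by omega⟩
      rw [pvL1]
      simp only [pvLoop1]
      rw [if_pos hgd, if_pos hgd]
      obtain ⟨hs1, hs2⟩ := (IH g (by omega)).1 (N - 1)
        (k + 1) j (d + (num * 10 + pvDigitVal (l1.getD k ' '))) m (by omega) (by omega) hg
      simp only [hs1]
      by_cases hr : pvF l1 l2 (k + 1) j (d + (num * 10 + pvDigitVal (l1.getD k ' '))) = true
      · rw [if_pos hr]
        exact ⟨by rw [hr]; rfl, hs2⟩
      · rw [if_neg hr]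
        have hr' := Bool.eq_false_iff.mpr hr
        simp only [hr', Bool.false_or]
        exact (IH g (by omega)).2.2 N i j d (k + 1)
          (num * 10 + pvDigitVal (l1.getD k ' ')) _ (by omega) (by omega) hs2
    · cases fuel with
      | zero =>
        rw [pvL1, if_neg hgd]
        simp only [pvLoop1]
        exact ⟨trivial, hg⟩
      | succ g =>
        rw [pvL1, if_neg hgd]
        simp only [pvLoop1]
        rw [if_neg hgd]
        exact ⟨rfl, hg⟩

theorem pvVal_unfold (l : List Char) (k b : Nat) (num : Int) (h : k < b) :
    pvVal l k b num = pvVal l (k + 1) b (num * 10 + pvDigitVal (l.getD k ' ')) := by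
  rw [pvVal]; simp [h]

theorem pvVal_refl (l : List Char) (k : Nat) (num : Int) : pvVal l k k num = num := by
  rw [pvVal]; simp

theorem pvL1_iff_fuel (l1 l2 : List Char) (j : Nat) (d : Int) :
    ∀ fuel k num, l1.length - k ≤ fuel → (pvL1 l1 l2 j d k num = true ↔
      ∃ b, k < b ∧ b ≤ l1.length ∧ (∀ t, k ≤ t → t < b → PySem.Chars.isdigit (l1.getD t ' '))
        ∧ pvF l1 l2 b j (d + pvVal l1 k b num) = true) := by
  intro fuel
  induction fuel with
  | zero =>
    intro k num hk
    rw [pvL1, if_neg (fun hc => by omega)]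
    constructor
    · intro h; exact absurd h (by simp)
    · rintro ⟨b, hb1, hb2, _, _⟩; omega
  | succ fuel ih =>
    intro k num hk
    rw [pvL1]
    by_cases hg : k < l1.length ∧ PySem.Chars.isdigit (l1.getD k ' ') = true
    · rw [if_pos hg]
      simp only [Bool.or_eq_true]
      rw [ih (k + 1) (num * 10 + pvDigitVal (l1.getD k ' ')) (by omega)]
      constructor
      · rintro (h1 | ⟨b, hb1, hb2, hdig, hF⟩)
        · exact ⟨k + 1, by omega, hg.1,
            (fun t ht1 ht2 => by
              have ht : t = k := by omega
              subst ht; exact hg.2),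
            by rwa [pvVal_unfold _ _ _ _ (by omega), pvVal_refl]⟩
        · refine ⟨b, by omega, hb2, ?_, ?_⟩
          · intro t ht1 ht2
            rcases Nat.lt_or_ge t (k + 1) with h' | h'
            · have ht : t = k := by omega
              subst ht; exact hg.2
            · exact hdig t h' ht2
          · rwa [pvVal_unfold _ _ _ _ (by omega)]
      · rintro ⟨b, hb1, hb2, hdig, hF⟩
        rcases eq_or_lt_of_le (Nat.succ_le_of_lt hb1) with h' | h'
        · left
          rw [← h', pvVal_unfold _ _ _ _ (by omega), pvVal_refl] at hF
          exact hF
        · right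
          refine ⟨b, h', hb2, (fun t ht1 ht2 => hdig t (by omega) ht2), ?_⟩
          rwa [pvVal_unfold _ _ _ _ (by omega)] at hF
    · rw [if_neg hg]
      constructor
      · intro h; exact absurd h (by simp)
      · rintro ⟨b, hb1, hb2, hdig, _⟩
        exact absurd ⟨by omega, hdig k le_rfl hb1⟩ hg

theorem pvL1_iff (l1 l2 : List Char) (j : Nat) (d : Int) :
    ∀ k num, pvL1 l1 l2 j d k num = true ↔
      ∃ b, k < b ∧ b ≤ l1.length ∧ (∀ t, k ≤ t → t < b → PySem.Chars.isdigit (l1.getD t ' '))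
        ∧ pvF l1 l2 b j (d + pvVal l1 k b num) = true :=
  fun k num => pvL1_iff_fuel l1 l2 j d (l1.length - k) k num le_rfl

theorem pvL2_iff_fuel (l1 l2 : List Char) (i : Nat) (d : Int) :
    ∀ fuel k num, l2.length - k ≤ fuel → (pvL2 l1 l2 i d k num = true ↔
      ∃ b, k < b ∧ b ≤ l2.length ∧ (∀ t, k ≤ t → t < b → PySem.Chars.isdigit (l2.getD t ' '))
        ∧ pvF l1 l2 i b (d - pvVal l2 k b num) = true) := by
  intro fuel
  induction fuel with
  | zero =>
    intro k num hk
    rw [pvL2, if_neg (fun hc => by omega)]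
    constructor
    · intro h; exact absurd h (by simp)
    · rintro ⟨b, hb1, hb2, _, _⟩; omega
  | succ fuel ih =>
    intro k num hk
    rw [pvL2]
    by_cases hg : k < l2.length ∧ PySem.Chars.isdigit (l2.getD k ' ') = true
    · rw [if_pos hg]
      simp only [Bool.or_eq_true]
      rw [ih (k + 1) (num * 10 + pvDigitVal (l2.getD k ' ')) (by omega)]
      constructor
      · rintro (h1 | ⟨b, hb1, hb2, hdig, hF⟩)
        · refine ⟨k + 1, by omega, hg.1, ?_, ?_⟩
          · intro t ht1 ht2
            have ht : t = k := by omega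
            subst ht; exact hg.2
          · rwa [pvVal_unfold _ _ _ _ (by omega), pvVal_refl]
        · refine ⟨b, by omega, hb2, ?_, ?_⟩
          · intro t ht1 ht2
            rcases Nat.lt_or_ge t (k + 1) with h' | h'
            · have ht : t = k := by omega
              subst ht; exact hg.2
            · exact hdig t h' ht2
          · rwa [pvVal_unfold _ _ _ _ (by omega)]
      · rintro ⟨b, hb1, hb2, hdig, hF⟩
        rcases eq_or_lt_of_le (Nat.succ_le_of_lt hb1) with h' | h'
        · left
          rw [← h', pvVal_unfold _ _ _ _ (by omega), pvVal_refl] at hF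
          exact hF
        · right
          refine ⟨b, h', hb2, (fun t ht1 ht2 => hdig t (by omega) ht2), ?_⟩
          rwa [pvVal_unfold _ _ _ _ (by omega)] at hF
    · rw [if_neg hg]
      constructor
      · intro h; exact absurd h (by simp)
      · rintro ⟨b, hb1, hb2, hdig, _⟩
        exact absurd ⟨by omega, hdig k le_rfl hb1⟩ hg

theorem pvL2_iff (l1 l2 : List Char) (i : Nat) (d : Int) :
    ∀ k num, pvL2 l1 l2 i d k num = true ↔
      ∃ b, k < b ∧ b ≤ l2.length ∧ (∀ t, k ≤ t → t < b → PySem.Chars.isdigit (l2.getD t ' '))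
        ∧ pvF l1 l2 i b (d - pvVal l2 k b num) = true :=
  fun k num => pvL2_iff_fuel l1 l2 i d (l2.length - k) k num le_rfl

theorem pvStep_sum_lt (l1 l2 : List Char) (s s' : Nat × Nat × Int) (h : pvStep l1 l2 s s') :
    s.1 + s.2.1 < s'.1 + s'.2.1 := by
  obtain ⟨b, hb1, _, _, rfl⟩ | ⟨b, hb1, _, _, rfl⟩ | ⟨_, _, _, rfl⟩ | ⟨_, _, _, rfl⟩
    | ⟨_, _, _, _, _, _, rfl⟩ := h <;> simp <;> omega

-- no transition leaves the terminal position
theorem pvStep_terminal (l1 l2 : List Char) (d : Int) (s' : Nat × Nat × Int)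
    (h : pvStep l1 l2 (l1.length, l2.length, d) s') : False := by
  obtain ⟨b, h1, h2, _, _⟩ | ⟨b, h1, h2, _, _⟩ | ⟨_, h1, _, _⟩ | ⟨_, h1, _, _⟩
    | ⟨_, h1, h2, _, _, _, _⟩ := h <;> dsimp only at * <;> omega

theorem pvF_of_step (l1 l2 : List Char) (s s' : Nat × Nat × Int) (hst : pvStep l1 l2 s s')
    (h : pvF l1 l2 s'.1 s'.2.1 s'.2.2 = true) : pvF l1 l2 s.1 s.2.1 s.2.2 = true := by
  obtain ⟨i, j, d⟩ := s
  have hterm : ¬(i = l1.length ∧ j = l2.length) := by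
    rintro ⟨rfl, rfl⟩
    exact pvStep_terminal l1 l2 d s' hst
  rw [pvStep] at hst
  dsimp only at hst h ⊢
  rw [pvF, if_neg hterm]
  simp only [Bool.or_eq_true]
  rcases hst with ⟨b, hb1, hb2, hdig, rfl⟩ | ⟨b, hb1, hb2, hdig, rfl⟩ | ⟨h0, hj, ha, rfl⟩
    | ⟨hneg, hi, ha, rfl⟩ | ⟨h0, hi, hj, ha1, ha2, heq, rfl⟩
  · left; left
    rw [if_pos ⟨by omega, hdig i le_rfl hb1⟩]
    exact (pvL1_iff l1 l2 j d i 0).2 ⟨b, hb1, hb2, hdig, h⟩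
  · left; right
    rw [if_pos ⟨by omega, hdig j le_rfl hb1⟩]
    exact (pvL2_iff l1 l2 i d j 0).2 ⟨b, hb1, hb2, hdig, h⟩
  · right
    rw [if_pos h0, if_pos ⟨hj, ha⟩]
    exact h
  · right
    rw [if_neg (by omega : ¬ (0:Int) < d), if_pos hneg, if_pos ⟨hi, ha⟩]
    exact h
  · right
    rw [if_neg (by omega : ¬ (0:Int) < d), if_neg (by omega : ¬ d < 0),
      if_pos ⟨hi, hj, ha1, ha2, heq⟩]
    have hd : d = 0 := h0
    subst hd
    exact h

theorem pvF_to_rtg (l1 l2 : List Char) :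
    ∀ fuel i j d, (l1.length - i) + (l2.length - j) ≤ fuel → pvF l1 l2 i j d = true →
      Relation.ReflTransGen (pvStep l1 l2) (i, j, d) (l1.length, l2.length, 0) := by
  intro fuel
  induction fuel with
  | zero =>
    intro i j d hm h
    by_cases hterm : i = l1.length ∧ j = l2.length
    · obtain ⟨rfl, rfl⟩ := hterm
      rw [pvF, if_pos ⟨rfl, rfl⟩, beq_iff_eq] at h
      subst h
      exact Relation.ReflTransGen.refl
    · rw [pvF, if_neg hterm] at h
      have hi : ¬ i < l1.length := by omega
      have hj : ¬ j < l2.length := by omega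
      simp only [hi, hj, false_and, if_false, Bool.false_or, and_false] at h
      split_ifs at h
  | succ fuel ih =>
    intro i j d hm h
    by_cases hterm : i = l1.length ∧ j = l2.length
    · obtain ⟨rfl, rfl⟩ := hterm
      rw [pvF, if_pos ⟨rfl, rfl⟩, beq_iff_eq] at h
      subst h
      exact Relation.ReflTransGen.refl
    · rw [pvF, if_neg hterm] at h
      simp only [Bool.or_eq_true] at h
      rcases h with (h | h) | h
      · by_cases hgd : i < l1.length ∧ PySem.Chars.isdigit (l1.getD i ' ') = true
        · rw [if_pos hgd] at h
          obtain ⟨b, hb1, hb2, hdig, hF⟩ := (pvL1_iff l1 l2 j d i 0).1 h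
          exact Relation.ReflTransGen.head (Or.inl ⟨b, hb1, hb2, hdig, rfl⟩)
            (ih b j (d + pvVal l1 i b 0) (by omega) hF)
        · rw [if_neg hgd] at h
          exact absurd h (by simp)
      · by_cases hgd : j < l2.length ∧ PySem.Chars.isdigit (l2.getD j ' ') = true
        · rw [if_pos hgd] at h
          obtain ⟨b, hb1, hb2, hdig, hF⟩ := (pvL2_iff l1 l2 i d j 0).1 h
          exact Relation.ReflTransGen.head (Or.inr (Or.inl ⟨b, hb1, hb2, hdig, rfl⟩))
            (ih i b (d - pvVal l2 j b 0) (by omega) hF)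
        · rw [if_neg hgd] at h
          exact absurd h (by simp)
      · by_cases h0 : 0 < d
        · rw [if_pos h0] at h
          by_cases hg1 : j < l2.length ∧ PySem.Chars.isalpha (l2.getD j ' ') = true
          · rw [if_pos hg1] at h
            exact Relation.ReflTransGen.head
              (Or.inr (Or.inr (Or.inl ⟨h0, hg1.1, hg1.2, rfl⟩)))
              (ih i (j + 1) (d - 1) (by omega) h)
          · rw [if_neg hg1] at h
            exact absurd h (by simp)
        · rw [if_neg h0] at h
          by_cases hneg : d < 0
          · rw [if_pos hneg] at h
            by_cases hg2 : i < l1.length ∧ PySem.Chars.isalpha (l1.getD i ' ') = true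
            · rw [if_pos hg2] at h
              exact Relation.ReflTransGen.head
                (Or.inr (Or.inr (Or.inr (Or.inl ⟨hneg, hg2.1, hg2.2, rfl⟩))))
                (ih (i + 1) j (d + 1) (by omega) h)
            · rw [if_neg hg2] at h
              exact absurd h (by simp)
          · rw [if_neg hneg] at h
            by_cases hg3 : i < l1.length ∧ j < l2.length
                ∧ PySem.Chars.isalpha (l1.getD i ' ') = true
                ∧ PySem.Chars.isalpha (l2.getD j ' ') = true ∧ l1.getD i ' ' = l2.getD j ' '
            · rw [if_pos hg3] at h
              have hd : d = 0 := by omega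
              subst hd
              exact Relation.ReflTransGen.head
                (Or.inr (Or.inr (Or.inr (Or.inr ⟨rfl, hg3.1, hg3.2.1, hg3.2.2.1,
                  hg3.2.2.2.1, hg3.2.2.2.2, rfl⟩))))
                (ih (i + 1) (j + 1) 0 (by omega) h)
            · rw [if_neg hg3] at h
              exact absurd h (by simp)

theorem pvF_iff_rtg (l1 l2 : List Char) (s : Nat × Nat × Int) :
    pvF l1 l2 s.1 s.2.1 s.2.2 = true ↔
      Relation.ReflTransGen (pvStep l1 l2) s (l1.length, l2.length, 0) := by
  constructor
  · intro h
    have := pvF_to_rtg l1 l2 ((l1.length - s.1) + (l2.length - s.2.1)) s.1 s.2.1 s.2.2 le_rfl h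
    simpa using this
  · intro h
    induction h using Relation.ReflTransGen.head_induction_on with
    | refl => rw [pvF]; simp
    | head hst _ ih => exact pvF_of_step _ _ _ _ hst ih

theorem pvSuccs1_mem_fuel (l1 : List Char) (j : Nat) (d : Int) :
    ∀ fuel k num x, l1.length - k ≤ fuel → (x ∈ pvSuccs1 l1 j d k num ↔
      ∃ b, k < b ∧ b ≤ l1.length ∧ (∀ t, k ≤ t → t < b → PySem.Chars.isdigit (l1.getD t ' '))
        ∧ x = (b, j, d + pvVal l1 k b num)) := by
  intro fuel
  induction fuel with
  | zero =>
    intro k num x hk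
    rw [pvSuccs1, if_neg (fun hc => by omega)]
    constructor
    · intro h; exact absurd h (by simp)
    · rintro ⟨b, hb1, hb2, _, _⟩; omega
  | succ fuel ih =>
    intro k num x hk
    rw [pvSuccs1]
    by_cases hg : k < l1.length ∧ PySem.Chars.isdigit (l1.getD k ' ') = true
    · rw [if_pos hg]
      simp only [List.mem_cons]
      rw [ih (k + 1) (num * 10 + pvDigitVal (l1.getD k ' ')) x (by omega)]
      constructor
      · rintro (h1 | ⟨b, hb1, hb2, hdig, hx⟩)
        · refine ⟨k + 1, by omega, hg.1, ?_, ?_⟩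
          · intro t ht1 ht2
            have ht : t = k := by omega
            subst ht; exact hg.2
          · rwa [pvVal_unfold _ _ _ _ (by omega), pvVal_refl]
        · refine ⟨b, by omega, hb2, ?_, ?_⟩
          · intro t ht1 ht2
            rcases Nat.lt_or_ge t (k + 1) with h' | h'
            · have ht : t = k := by omega
              subst ht; exact hg.2
            · exact hdig t h' ht2
          · rwa [pvVal_unfold _ _ _ _ (by omega)]
      · rintro ⟨b, hb1, hb2, hdig, hx⟩
        rcases eq_or_lt_of_le (Nat.succ_le_of_lt hb1) with h' | h'
        · left
          rw [← h', pvVal_unfold _ _ _ _ (by omega), pvVal_refl] at hx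
          exact hx
        · right
          refine ⟨b, h', hb2, (fun t ht1 ht2 => hdig t (by omega) ht2), ?_⟩
          rwa [pvVal_unfold _ _ _ _ (by omega)] at hx
    · rw [if_neg hg]
      constructor
      · intro h; exact absurd h (by simp)
      · rintro ⟨b, hb1, hb2, hdig, _⟩
        exact absurd ⟨by omega, hdig k le_rfl hb1⟩ hg

theorem pvSuccs1_mem (l1 : List Char) (j : Nat) (d : Int) :
    ∀ k num x, x ∈ pvSuccs1 l1 j d k num ↔
      ∃ b, k < b ∧ b ≤ l1.length ∧ (∀ t, k ≤ t → t < b → PySem.Chars.isdigit (l1.getD t ' '))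
        ∧ x = (b, j, d + pvVal l1 k b num) :=
  fun k num x => pvSuccs1_mem_fuel l1 j d (l1.length - k) k num x le_rfl

theorem pvSuccs2_mem_fuel (l2 : List Char) (i : Nat) (d : Int) :
    ∀ fuel k num x, l2.length - k ≤ fuel → (x ∈ pvSuccs2 l2 i d k num ↔
      ∃ b, k < b ∧ b ≤ l2.length ∧ (∀ t, k ≤ t → t < b → PySem.Chars.isdigit (l2.getD t ' '))
        ∧ x = (i, b, d - pvVal l2 k b num)) := by
  intro fuel
  induction fuel with
  | zero =>
    intro k num x hk
    rw [pvSuccs2, if_neg (fun hc => by omega)]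
    constructor
    · intro h; exact absurd h (by simp)
    · rintro ⟨b, hb1, hb2, _, _⟩; omega
  | succ fuel ih =>
    intro k num x hk
    rw [pvSuccs2]
    by_cases hg : k < l2.length ∧ PySem.Chars.isdigit (l2.getD k ' ') = true
    · rw [if_pos hg]
      simp only [List.mem_cons]
      rw [ih (k + 1) (num * 10 + pvDigitVal (l2.getD k ' ')) x (by omega)]
      constructor
      · rintro (h1 | ⟨b, hb1, hb2, hdig, hx⟩)
        · refine ⟨k + 1, by omega, hg.1, ?_, ?_⟩
          · intro t ht1 ht2
            have ht : t = k := by omega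
            subst ht; exact hg.2
          · rwa [pvVal_unfold _ _ _ _ (by omega), pvVal_refl]
        · refine ⟨b, by omega, hb2, ?_, ?_⟩
          · intro t ht1 ht2
            rcases Nat.lt_or_ge t (k + 1) with h' | h'
            · have ht : t = k := by omega
              subst ht; exact hg.2
            · exact hdig t h' ht2
          · rwa [pvVal_unfold _ _ _ _ (by omega)]
      · rintro ⟨b, hb1, hb2, hdig, hx⟩
        rcases eq_or_lt_of_le (Nat.succ_le_of_lt hb1) with h' | h'
        · left
          rw [← h', pvVal_unfold _ _ _ _ (by omega), pvVal_refl] at hx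
          exact hx
        · right
          refine ⟨b, h', hb2, (fun t ht1 ht2 => hdig t (by omega) ht2), ?_⟩
          rwa [pvVal_unfold _ _ _ _ (by omega)] at hx
    · rw [if_neg hg]
      constructor
      · intro h; exact absurd h (by simp)
      · rintro ⟨b, hb1, hb2, hdig, _⟩
        exact absurd ⟨by omega, hdig k le_rfl hb1⟩ hg

theorem pvSuccs2_mem (l2 : List Char) (i : Nat) (d : Int) :
    ∀ k num x, x ∈ pvSuccs2 l2 i d k num ↔
      ∃ b, k < b ∧ b ≤ l2.length ∧ (∀ t, k ≤ t → t < b → PySem.Chars.isdigit (l2.getD t ' '))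
        ∧ x = (i, b, d - pvVal l2 k b num) :=
  fun k num x => pvSuccs2_mem_fuel l2 i d (l2.length - k) k num x le_rfl

theorem pvSuccs_iff_step (l1 l2 : List Char) (s x : Nat × Nat × Int) :
    x ∈ pvSuccs l1 l2 s ↔ pvStep l1 l2 s x := by
  obtain ⟨i, j, d⟩ := s
  rw [pvSuccs, pvStep]
  simp only [List.mem_append, pvSuccs1_mem, pvSuccs2_mem]
  constructor
  · rintro ((h | h) | h)
    · exact Or.inl h
    · exact Or.inr (Or.inl h)
    · split_ifs at h with h0 hj hneg hi hmatch
      · simp only [List.mem_singleton] at h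
        exact Or.inr (Or.inr (Or.inl ⟨h0, hj.1, hj.2, h⟩))
      · simp at h
      · simp only [List.mem_singleton] at h
        exact Or.inr (Or.inr (Or.inr (Or.inl ⟨hneg, hi.1, hi.2, h⟩)))
      · simp at h
      · simp only [List.mem_singleton] at h
        exact Or.inr (Or.inr (Or.inr (Or.inr ⟨by omega, hmatch.1, hmatch.2.1,
          hmatch.2.2.1, hmatch.2.2.2.1, hmatch.2.2.2.2, h⟩)))
      · simp at h
  · rintro (⟨b, hb1, hb2, hdig, rfl⟩ | ⟨b, hb1, hb2, hdig, rfl⟩ | ⟨h0, hj, ha, rfl⟩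
      | ⟨hneg, hi, ha, rfl⟩ | ⟨h0, hi, hj, ha1, ha2, heq, rfl⟩)
    · exact Or.inl (Or.inl ⟨b, hb1, hb2, hdig, rfl⟩)
    · exact Or.inl (Or.inr ⟨b, hb1, hb2, hdig, rfl⟩)
    · refine Or.inr ?_
      rw [if_pos h0, if_pos ⟨hj, ha⟩]
      simp
    · refine Or.inr ?_
      rw [if_neg (by omega : ¬ (0:Int) < d), if_pos hneg, if_pos ⟨hi, ha⟩]
      simp
    · refine Or.inr ?_
      rw [if_neg (by omega : ¬ (0:Int) < d), if_neg (by omega : ¬ d < 0),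
        if_pos ⟨hi, hj, ha1, ha2, heq⟩]
      simp

theorem pvRB_mono (l1 l2 : List Char) {t t' : Nat} (h : t ≤ t') {s : Nat × Nat × Int}
    (hs : pvRB l1 l2 t s) : pvRB l1 l2 t' s := by
  induction hs with
  | base => exact .base
  | step _ hlt hst ih => exact .step ih (lt_of_lt_of_le hlt h) hst

theorem pvRB_succ_iff (l1 l2 : List Char) (t : Nat) (x : Nat × Nat × Int) :
    pvRB l1 l2 (t + 1) x ↔
      pvRB l1 l2 t x ∨ ∃ s, pvRB l1 l2 t s ∧ s.1 + s.2.1 = t ∧ pvStep l1 l2 s x := by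
  constructor
  · intro h
    induction h with
    | base => exact Or.inl .base
    | @step s s' hs hlt hst ih =>
      have hrs : pvRB l1 l2 t s := by
        rcases ih with h' | ⟨s₀, _, hsum, hst₀⟩
        · exact h'
        · have := pvStep_sum_lt l1 l2 s₀ s hst₀
          omega
      rcases Nat.lt_or_ge (s.1 + s.2.1) t with h' | h'
      · exact Or.inl (.step hrs h' hst)
      · exact Or.inr ⟨s, hrs, by omega, hst⟩
  · rintro (h | ⟨s, hs, hsum, hst⟩)
    · exact pvRB_mono l1 l2 (Nat.le_succ t) h
    · exact .step (pvRB_mono l1 l2 (Nat.le_succ t) hs) (by omega) hst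

theorem pvMem_foldl_add {α : Type} [BEq α] [LawfulBEq α] (ys : List α) (R : PySem.Set α) (x : α) :
    x ∈ ys.foldl PySem.Set.add R ↔ x ∈ R ∨ x ∈ ys := by
  induction ys generalizing R with
  | nil => simp
  | cons y ys ih => simp [List.foldl_cons, ih, PySem.Set.mem_add, List.mem_cons]; tauto

theorem pvMem_foldl_addAll (f : Nat × Nat × Int → List (Nat × Nat × Int))
    (L : List (Nat × Nat × Int)) (R : PySem.Set (Nat × Nat × Int)) (x : Nat × Nat × Int) :
    x ∈ L.foldl (fun R' s => (f s).foldl PySem.Set.add R') R ↔ x ∈ R ∨ ∃ s ∈ L, x ∈ f s := by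
  induction L generalizing R with
  | nil => simp
  | cons y L ih =>
    rw [List.foldl_cons, ih, pvMem_foldl_add]
    simp only [List.mem_cons]
    constructor
    · rintro ((h | h) | ⟨s, hs, hx⟩)
      · exact Or.inl h
      · exact Or.inr ⟨y, Or.inl rfl, h⟩
      · exact Or.inr ⟨s, Or.inr hs, hx⟩
    · rintro (h | ⟨s, (rfl | hs), hx⟩)
      · exact Or.inl (Or.inl h)
      · exact Or.inl (Or.inr hx)
      · exact Or.inr ⟨s, hs, hx⟩

theorem pvLayer_inv (l1 l2 : List Char) (t : Nat) (R : PySem.Set (Nat × Nat × Int))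
    (hR : ∀ x, x ∈ R ↔ pvRB l1 l2 t x) :
    ∀ x, x ∈ (R.filter (fun s => s.1 + s.2.1 == t)).foldl
        (fun R' s => (pvSuccs l1 l2 s).foldl PySem.Set.add R') R ↔ pvRB l1 l2 (t + 1) x := by
  intro x
  rw [pvMem_foldl_addAll, pvRB_succ_iff]
  constructor
  · rintro (h | ⟨s, hs, hx⟩)
    · exact Or.inl ((hR x).1 h)
    · rw [List.mem_filter] at hs
      exact Or.inr ⟨s, (hR s).1 hs.1, by simpa using hs.2, (pvSuccs_iff_step l1 l2 s x).1 hx⟩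
  · rintro (h | ⟨s, hs, hsum, hst⟩)
    · exact Or.inl ((hR x).2 h)
    · refine Or.inr ⟨s, ?_, (pvSuccs_iff_step l1 l2 s x).2 hst⟩
      rw [List.mem_filter]
      exact ⟨(hR s).2 hs, by simpa using hsum⟩

theorem pvRange_inv (l1 l2 : List Char) (n : Nat) :
    ∀ x, x ∈ (List.range n).foldl
      (fun R t =>
        (R.filter (fun s => s.1 + s.2.1 == t)).foldl
          (fun R' s => (pvSuccs l1 l2 s).foldl PySem.Set.add R') R)
      (PySem.Set.ofList [(0, 0, 0)]) ↔ pvRB l1 l2 n x := by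
  induction n with
  | zero =>
    intro x
    simp only [List.range_zero, List.foldl_nil]
    constructor
    · intro h
      have hx : x = ((0 : Nat), (0 : Nat), (0 : Int)) := by
        simpa [PySem.Set.ofList, PySem.Set.add, PySem.Set.empty] using h
      rw [hx]; exact .base
    · intro h
      cases h with
      | base => simp [PySem.Set.ofList, PySem.Set.add, PySem.Set.empty]
      | step _ hlt _ => omega
  | succ n ih =>
    intro x
    rw [List.range_succ, List.foldl_append, List.foldl_cons, List.foldl_nil]
    exact pvLayer_inv l1 l2 n _ ih x

theorem pvRB_to_rtg (l1 l2 : List Char) (t : Nat) (s : Nat × Nat × Int) (h : pvRB l1 l2 t s) :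
    Relation.ReflTransGen (pvStep l1 l2) (0, 0, 0) s := by
  induction h with
  | base => exact .refl
  | step _ _ hst ih => exact .tail ih hst

theorem pvRtg_to_RB (l1 l2 : List Char) (s : Nat × Nat × Int)
    (h : Relation.ReflTransGen (pvStep l1 l2) (0, 0, 0) s) : pvRB l1 l2 (s.1 + s.2.1) s := by
  induction h with
  | refl => exact .base
  | tail hr hst ih =>
    exact .step (pvRB_mono l1 l2 (le_of_lt (pvStep_sum_lt _ _ _ _ hst)) ih)
      (pvStep_sum_lt _ _ _ _ hst) hst

-- ===== VERDICT (by name: the statement is the Claim_ definition above) =====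
theorem possiblyEquals_spec : Claim_equal_possiblyEquals := by
  intro s1 s2 _
  unfold Spec_possiblyEquals possiblyEquals possiblyEquals_alt
  rw [Bool.eq_iff_iff]
  rw [PySem.Set.contains_iff]
  rw [pvRange_inv]
  have hA := ((pvSolve_eq_aux s1.toList s2.toList
      ((s1.toList.length + s2.toList.length + 3) * (s1.toList.length + s2.toList.length + 1))).1
    (s1.toList.length + s2.toList.length + 1) 0 0 0 PySem.Dict.empty
    (by omega) le_rfl (pvGood_empty s1.toList s2.toList)).1
  rw [hA]
  rw [show pvF s1.toList s2.toList 0 0 0 = pvF s1.toList s2.toList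
      (((0:Nat),(0:Nat),(0:Int)) : Nat × Nat × Int).1 ((0:Nat),(0:Nat),(0:Int)).2.1 ((0:Nat),(0:Nat),(0:Int)).2.2 from rfl]
  rw [pvF_iff_rtg]
  constructor
  · intro h
    have := pvRtg_to_RB s1.toList s2.toList _ h
    simpa using this
  · intro h
    exact pvRB_to_rtg s1.toList s2.toList _ _ h
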